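-- pv_equiv track=rewrite | github.com/UnivaultOffice/build_tools | scripts/config.py | _pick_preferred_qmake
-- ===== SOURCE A (Python) =====
-- def _pick_preferred_qmake(qmake_paths):
--   if not qmake_paths:
--     return ""
--   prefer = [
--     "msvc2022_64", "msvc2022",
--     "msvc2019_64", "msvc2019",
--     "msvc2017_64", "msvc2017",
--     "msvc2015_64", "msvc2015",
--     "mingw", "clang", "gcc"
--   ]
--   lower_map = [(p, p.lower()) for p in qmake_paths]
--   for tag in prefer:
--     for path, lower_path in lower_map:
--       if tag in lower_path:
--         return path
--   return qmake_paths[0]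
-- ===== SOURCE B (Python) =====
-- def _pick_preferred_qmake(qmake_paths):
--   if not qmake_paths:
--     return ""
--   prefer = [
--     "msvc2022_64", "msvc2022",
--     "msvc2019_64", "msvc2019",
--     "msvc2017_64", "msvc2017",
--     "msvc2015_64", "msvc2015",
--     "mingw", "clang", "gcc"
--   ]
--   nprefer = len(prefer)
--
--   def rank(path):
--     lp = path.lower()
--     for i, tag in enumerate(prefer):
--       if tag in lp:
--         return i
--     return nprefer
--
--   best_path = qmake_paths[0]
--   best_rank = rank(best_path)
--   for path in qmake_paths[1:]:
--     r = rank(path)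
--     if r < best_rank:
--       best_rank, best_path = r, path
--   return best_path
-- ===== Notes on version B (the rewrite author's own statement) =====
-- stated objective: alternative
-- what changed: Inverts A's tag-outer/path-inner double loop into a per-path rank computation followed by a single min-selection pass over the paths (first path with the smallest rank wins).
import Mathlib
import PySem

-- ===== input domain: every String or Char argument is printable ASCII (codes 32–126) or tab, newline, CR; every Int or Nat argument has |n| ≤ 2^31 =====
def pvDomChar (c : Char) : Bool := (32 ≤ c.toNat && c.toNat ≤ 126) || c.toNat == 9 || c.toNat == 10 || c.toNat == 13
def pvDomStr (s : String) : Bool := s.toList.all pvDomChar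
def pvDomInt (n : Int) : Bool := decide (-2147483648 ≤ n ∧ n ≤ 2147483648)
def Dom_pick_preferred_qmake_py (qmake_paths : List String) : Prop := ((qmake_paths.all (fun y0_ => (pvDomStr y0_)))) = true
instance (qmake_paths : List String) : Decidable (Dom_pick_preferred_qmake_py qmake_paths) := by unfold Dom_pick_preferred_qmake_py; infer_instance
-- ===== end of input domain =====

-- B changes the decomposition only: one rank per path plus a single min pass instead of A's
-- tag-outer/path-inner double loop; same asymptotic cost.

-- the compiler preference list (shared constant of both Pythons)
def pvPrefer : List String :=
  ["msvc2022_64", "msvc2022", "msvc2019_64", "msvc2019", "msvc2017_64", "msvc2017",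
   "msvc2015_64", "msvc2015", "mingw", "clang", "gcc"]

-- ===== PORT A =====
-- inner loop: 'for path, lower_path in lower_map: if tag in lower_path: return path'
def pvScanPaths (tag : String) : List (String × String) → Option String
  | [] => none
  | (path, lp) :: rest =>
    if PySem.Str.isIn tag lp then some path else pvScanPaths tag rest

-- outer loop: 'for tag in prefer: …'
def pvScanTags (lm : List (String × String)) : List String → Option String
  | [] => none
  | tag :: tags =>
    match pvScanPaths tag lm with
    | some p => some p
    | none => pvScanTags lm tags

def pick_preferred_qmake_py (qmake_paths : List String) : String :=
  match qmake_paths with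
  | [] => ""
  | x :: _ =>
    let lm := qmake_paths.map (fun p => (p, PySem.Str.lower p))
    match pvScanTags lm pvPrefer with
    | some p => p
    | none => x

-- ===== PORT B =====
-- 'for i, tag in enumerate(prefer): if tag in lp: return i / return nprefer'
def pvRankGo (lp : String) : List String → Nat → Nat
  | [], _ => pvPrefer.length
  | tag :: tags, i => if PySem.Str.isIn tag lp then i else pvRankGo lp tags (i + 1)

def pvRank (path : String) : Nat := pvRankGo (PySem.Str.lower path) pvPrefer 0

-- 'for path in qmake_paths[1:]: r = rank(path); if r < best_rank: …'
def pvBestLoop (k : String → Nat) : List String → Nat × String → String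
  | [], (_, bp) => bp
  | path :: rest, (br, bp) =>
    let r := k path
    if r < br then pvBestLoop k rest (r, path) else pvBestLoop k rest (br, bp)

def pick_preferred_qmake_py_alt (qmake_paths : List String) : String :=
  match qmake_paths with
  | [] => ""
  | x :: rest => pvBestLoop pvRank rest (pvRank x, x)

-- ===== PRECONDITION & SPEC =====
def Spec_pick_preferred_qmake_py (qmake_paths : List String) (out : String) : Prop := out = pick_preferred_qmake_py_alt qmake_paths
instance (qmake_paths : List String) (out : String) : Decidable (Spec_pick_preferred_qmake_py qmake_paths out) := by unfold Spec_pick_preferred_qmake_py; infer_instance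

-- ===== CLAIM (what is proved, stated in full; the proofs are below) =====
def Claim_equal_pick_preferred_qmake_py : Prop := ∀ (qmake_paths : List String), Dom_pick_preferred_qmake_py qmake_paths → Spec_pick_preferred_qmake_py qmake_paths (pick_preferred_qmake_py qmake_paths)

-- ===== LEMMAS AND PROOFS =====

-- structural rank w.r.t. an arbitrary tag list, capped at its length
def pvK (tags : List String) (lp : String) : Nat :=
  match tags with
  | [] => 0
  | tag :: ts => if PySem.Str.isIn tag lp then 0 else pvK ts lp + 1

lemma pvRankGo_eq (lp : String) : ∀ (ts : List String) (i : Nat),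
    (pvK ts lp < ts.length → pvRankGo lp ts i = i + pvK ts lp) ∧
    (¬ pvK ts lp < ts.length → pvRankGo lp ts i = pvPrefer.length) := by
  intro ts
  induction ts with
  | nil => intro i; exact ⟨fun h => by simp [pvK] at h, fun _ => rfl⟩
  | cons t ts ih =>
    intro i
    by_cases h : PySem.Str.isIn t lp = true
    · simp only [pvRankGo, pvK, if_pos h, List.length_cons]
      exact ⟨fun _ => by omega, by omega⟩
    · simp only [pvRankGo, pvK, if_neg h, List.length_cons]
      constructor
      · intro hlt
        rw [(ih (i+1)).1 (by omega)]; omega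
      · intro hge
        exact (ih (i+1)).2 (by omega)

lemma pvK_le (ts : List String) (lp : String) : pvK ts lp ≤ ts.length := by
  induction ts with
  | nil => simp [pvK]
  | cons t ts ih =>
    by_cases h : PySem.Str.isIn t lp = true
    · simp only [pvK, if_pos h]; omega
    · simp only [pvK, if_neg h, List.length_cons]; omega

-- pvRank equals the structural rank with cap = |pvPrefer| (the cap value coincides)
lemma pvRank_eq (path : String) : pvRank path = pvK pvPrefer (PySem.Str.lower path) := by
  unfold pvRank
  rcases Nat.lt_or_ge (pvK pvPrefer (PySem.Str.lower path)) pvPrefer.length with h | h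
  · rw [(pvRankGo_eq _ pvPrefer 0).1 h]; omega
  · rw [(pvRankGo_eq _ pvPrefer 0).2 (by omega)]
    have h2 := pvK_le pvPrefer (PySem.Str.lower path)
    omega

-- best-rank 0 is unbeatable: the loop keeps its accumulator
lemma pvBestLoop_zero (k : String → Nat) : ∀ (rest : List String) (bp : String),
    pvBestLoop k rest (0, bp) = bp := by
  intro rest
  induction rest with
  | nil => intro bp; rfl
  | cons y t ih => intro bp; simp only [pvBestLoop, Nat.not_lt_zero, if_false, ih]

-- if the accumulator rank is nonzero, the loop returns the first element of rank 0
lemma pvBestLoop_find_zero (k : String → Nat) :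
    ∀ (rest : List String) (br : Nat) (bp m : String), br ≠ 0 →
    rest.find? (fun y => k y == 0) = some m →
    pvBestLoop k rest (br, bp) = m := by
  intro rest
  induction rest with
  | nil => intro br bp m _ h; simp at h
  | cons y t ih =>
    intro br bp m hbr hf
    by_cases hy : k y = 0
    · rw [List.find?_cons_of_pos (by simp [hy])] at hf
      injection hf with hf
      subst hf
      simp only [pvBestLoop, hy]
      rw [if_pos (by omega)]
      exact pvBestLoop_zero k t y
    · rw [List.find?_cons_of_neg (by simp [hy])] at hf
      simp only [pvBestLoop]
      by_cases hlt : k y < br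
      · rw [if_pos hlt]; exact ih (k y) y m hy hf
      · rw [if_neg hlt]; exact ih br bp m hbr hf

-- if no element has rank 0, the loop never reaches rank 0 either: result by key shift
lemma pvBestLoop_shift (k k' : String → Nat) :
    ∀ (rest : List String) (br : Nat) (bp : String),
    (∀ y ∈ rest, k' y = k y + 1) →
    pvBestLoop k' rest (br + 1, bp) = pvBestLoop k rest (br, bp) := by
  intro rest
  induction rest with
  | nil => intro br bp _; rfl
  | cons y t ih =>
    intro br bp h
    have hy := h y (by simp)
    have ht : ∀ z ∈ t, k' z = k z + 1 := fun z hz => h z (by simp [hz])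
    simp only [pvBestLoop, hy]
    by_cases hlt : k y < br
    · rw [if_pos (by omega), if_pos hlt]
      exact ih (k y) y ht
    · rw [if_neg (by omega), if_neg hlt]
      exact ih br bp ht

-- A's inner scan over the lowered map is a find? over the paths
lemma pvScanPaths_map (tag : String) (xs : List String) :
    pvScanPaths tag (xs.map (fun p => (p, PySem.Str.lower p))) =
      xs.find? (fun p => PySem.Str.isIn tag (PySem.Str.lower p)) := by
  induction xs with
  | nil => rfl
  | cons x t ih =>
    rw [List.map_cons]
    by_cases h : PySem.Str.isIn tag (PySem.Str.lower x) = true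
    · simp only [pvScanPaths, if_pos h]
      rw [List.find?_cons_of_pos (p := fun p => PySem.Str.isIn tag (PySem.Str.lower p)) h]
    · simp only [pvScanPaths, if_neg h]
      rw [List.find?_cons_of_neg (p := fun p => PySem.Str.isIn tag (PySem.Str.lower p)) (by simpa using h), ih]

-- find? only looks at the predicate's values on the list's elements
lemma pvFind?_ext {α : Type} (p q : α → Bool) (l : List α)
    (h : ∀ a ∈ l, p a = q a) : l.find? p = l.find? q := by
  induction l with
  | nil => rfl
  | cons a t ih =>
    simp only [List.find?, h a (by simp)]
    exact match q a with
    | true => rfl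
    | false => ih fun b hb => h b (by simp [hb])

lemma pvK_cons_true {t lp : String} (ts : List String)
    (h : PySem.Str.isIn t lp = true) : pvK (t :: ts) lp = 0 := by
  simp only [pvK, if_pos h]

lemma pvK_cons_false {t lp : String} (ts : List String)
    (h : PySem.Str.isIn t lp = false) : pvK (t :: ts) lp = pvK ts lp + 1 := by
  have h' : ¬ PySem.Str.isIn t lp = true := by rw [h]; exact Bool.false_ne_true
  simp only [pvK, if_neg h']

-- main correspondence, by induction on the tag list
lemma pvMain : ∀ (ts : List String) (x : String) (rest : List String),
    pvBestLoop (fun p => pvK ts (PySem.Str.lower p)) rest (pvK ts (PySem.Str.lower x), x) =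
      (match pvScanTags ((x :: rest).map (fun p => (p, PySem.Str.lower p))) ts with
       | some p => p
       | none => x) := by
  intro ts
  induction ts with
  | nil =>
    intro x rest
    simp only [pvScanTags, pvK]
    exact pvBestLoop_zero _ rest x
  | cons t ts ih =>
    intro x rest
    simp only [pvScanTags, pvScanPaths_map]
    by_cases hx : PySem.Str.isIn t (PySem.Str.lower x) = true
    · -- head path matches the head tag: both sides give x
      have h0 : pvK (t :: ts) (PySem.Str.lower x) = 0 := by simp only [pvK, if_pos hx]
      rw [h0, pvBestLoop_zero]
      rw [List.find?_cons_of_pos (p := fun p => PySem.Str.isIn t (PySem.Str.lower p)) hx]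
    · have hxk : pvK (t :: ts) (PySem.Str.lower x) = pvK ts (PySem.Str.lower x) + 1 := by
        simp only [pvK, if_neg hx]
      rw [hxk, List.find?_cons_of_neg (p := fun p => PySem.Str.isIn t (PySem.Str.lower p)) (by simpa using hx)]
      rcases hfind : rest.find? (fun p => PySem.Str.isIn t (PySem.Str.lower p)) with _ | m
      · -- no path matches tag t: all keys shift by one, fall through to the tail tags
        have hnone : ∀ y ∈ rest, ¬ PySem.Str.isIn t (PySem.Str.lower y) = true := by
          intro y hy hc
          exact List.find?_eq_none.mp hfind y hy hc
        rw [pvBestLoop_shift (fun p => pvK ts (PySem.Str.lower p))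
              (fun p => pvK (t :: ts) (PySem.Str.lower p)) rest _ x
              (by intro y hy; simp only [pvK, if_neg (hnone y hy)])]
        exact ih x rest
      · -- some path matches tag t: the loop returns the first such path
        have hm : rest.find? (fun y => pvK (t :: ts) (PySem.Str.lower y) == 0) = some m := by
          rw [pvFind?_ext _ _ rest ?_]
          · exact hfind
          · intro a _
            cases hb : PySem.Str.isIn t (PySem.Str.lower a) with
            | true => rw [pvK_cons_true ts hb]; rfl
            | false => rw [pvK_cons_false ts hb]; rfl
        rw [pvBestLoop_find_zero _ rest _ x m (by omega) hm]

-- ===== VERDICT (by name: the statement is the Claim_ definition above) =====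
theorem pick_preferred_qmake_py_spec : Claim_equal_pick_preferred_qmake_py := by
  intro xs _
  unfold Spec_pick_preferred_qmake_py
  cases xs with
  | nil => rfl
  | cons x rest =>
    have hk : pvRank = fun p => pvK pvPrefer (PySem.Str.lower p) := funext pvRank_eq
    show (match pvScanTags ((x :: rest).map (fun p => (p, PySem.Str.lower p))) pvPrefer with
          | some p => p
          | none => x) = pvBestLoop pvRank rest (pvRank x, x)
    rw [hk, ← pvMain pvPrefer x rest]
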